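-- pv_equiv track=rewrite | github.com/redbuttegarden/redbuttegarden-django | redbuttegarden/memberships/services/recommendations.py | _prev_step
-- ===== SOURCE A (Python) =====
-- from typing import Iterable, List, Mapping, Optional, Sequence, Set, Tuple
--
-- TICKET_STEPS: Tuple[int, ...] = (0, 2, 4, 6)
--
-- def _prev_step(tickets: int) -> Optional[int]:
--     prev = None
--     for v in TICKET_STEPS:
--         if v < tickets:
--             prev = v
--         else:
--             break
--     return prev
-- ===== SOURCE B (Python) =====
-- import bisect
--
-- TICKET_STEPS = (0, 2, 4, 6)
--
-- def _prev_step(tickets):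
--     i = bisect.bisect_left(TICKET_STEPS, tickets)
--     return TICKET_STEPS[i - 1] if i > 0 else None
-- ===== Notes on version B (the rewrite author's own statement) =====
-- stated objective: idiomatic
-- what changed: Replaced the linear scan-with-break over TICKET_STEPS by bisect.bisect_left binary search on the sorted constant tuple, returning the element before the insertion point.
import Mathlib
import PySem

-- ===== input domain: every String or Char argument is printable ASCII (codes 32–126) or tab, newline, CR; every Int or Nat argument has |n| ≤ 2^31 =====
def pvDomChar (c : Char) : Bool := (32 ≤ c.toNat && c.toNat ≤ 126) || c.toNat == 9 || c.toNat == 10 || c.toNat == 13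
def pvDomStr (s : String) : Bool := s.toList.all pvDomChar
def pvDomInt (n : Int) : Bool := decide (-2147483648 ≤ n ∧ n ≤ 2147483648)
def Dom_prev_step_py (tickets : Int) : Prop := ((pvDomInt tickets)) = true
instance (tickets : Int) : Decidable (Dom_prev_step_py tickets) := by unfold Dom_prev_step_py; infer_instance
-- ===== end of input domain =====

-- B replaces A's linear scan-with-break by a bisect_left binary search on the sorted constant tuple (idiomatic).

def ticketSteps : List Int := [0, 2, 4, 6]

-- ===== PORT A =====
-- A's for-loop with break: walk the steps, updating prev while v < tickets, stop at the first v ≥ tickets.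
def prevStepLoop (tickets : Int) : List Int → Option Int → Option Int
  | [], prev => prev
  | v :: rest, prev => if v < tickets then prevStepLoop tickets rest (some v) else prev

def prev_step_py (tickets : Int) : Option Int :=
  prevStepLoop tickets ticketSteps none

-- ===== PORT B =====
-- transliteration of bisect.bisect_left's lo/hi loop (fuel = hi - lo bound, here list length suffices)
def bisectLeftGo (a : List Int) (x : Int) : Nat → Nat → Nat → Nat
  | 0, lo, _ => lo
  | fuel + 1, lo, hi =>
    if lo < hi then
      let mid := (lo + hi) / 2
      if a.getD mid 0 < x then bisectLeftGo a x fuel (mid + 1) hi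
      else bisectLeftGo a x fuel lo mid
    else lo

def bisectLeft (a : List Int) (x : Int) : Nat :=
  bisectLeftGo a x a.length 0 a.length

def prev_step_py_alt (tickets : Int) : Option Int :=
  let i := bisectLeft ticketSteps tickets
  if i > 0 then some (ticketSteps.getD (i - 1) 0) else none

-- ===== PRECONDITION & SPEC =====
def Spec_prev_step_py (tickets : Int) (out : Option Int) : Prop := out = prev_step_py_alt tickets
instance (tickets : Int) (out : Option Int) : Decidable (Spec_prev_step_py tickets out) := by unfold Spec_prev_step_py; infer_instance

-- ===== CLAIM (what is proved, stated in full; the proofs are below) =====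
def Claim_equal_prev_step_py : Prop := ∀ (tickets : Int), Dom_prev_step_py tickets → Spec_prev_step_py tickets (prev_step_py tickets)

-- ===== LEMMAS AND PROOFS =====
theorem prev_step_cases (t : Int) :
    prev_step_py t = prev_step_py_alt t := by
  unfold prev_step_py prev_step_py_alt bisectLeft ticketSteps
  rcases lt_or_ge (6:Int) t with h6 | h6
  · simp [prevStepLoop, bisectLeftGo, List.getD,
      show (0:Int) < t from by omega, show (2:Int) < t from by omega,
      show (4:Int) < t from by omega, h6]
  rcases lt_or_ge (4:Int) t with h4 | h4
  · simp [prevStepLoop, bisectLeftGo, List.getD,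
      show (0:Int) < t from by omega, show (2:Int) < t from by omega,
      h4, show ¬ ((6:Int) < t) from by omega]
  rcases lt_or_ge (2:Int) t with h2 | h2
  · simp [prevStepLoop, bisectLeftGo, List.getD,
      show (0:Int) < t from by omega, h2,
      show ¬ ((4:Int) < t) from by omega, show ¬ ((6:Int) < t) from by omega]
  rcases lt_or_ge (0:Int) t with h0 | h0
  · simp [prevStepLoop, bisectLeftGo, List.getD, h0,
      show ¬ ((2:Int) < t) from by omega,
      show ¬ ((4:Int) < t) from by omega, show ¬ ((6:Int) < t) from by omega]
  · simp [prevStepLoop, bisectLeftGo, List.getD,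
      show ¬ ((0:Int) < t) from by omega,
      show ¬ ((4:Int) < t) from by omega]
    omega

-- ===== VERDICT (by name: the statement is the Claim_ definition above) =====
theorem prev_step_py_spec : Claim_equal_prev_step_py := by
  intro t _
  unfold Spec_prev_step_py
  exact prev_step_cases t
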